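-- pv_equiv track=rewrite | github.com/alex-ozdemir/lambda-traffic-experiment | results/analyze.py | partition_packets
-- ===== SOURCE A (Python) =====
-- import bisect
--
-- def partition_packets(packets, bucket_ranges):
--     '''
--     Given a list of value and a list of N half-open intervals,
--     returns N lists containing the (sorted) values in each interval.
--     '''
--     packets.sort()
--     buckets = []
--     for start, end in bucket_ranges:
--         left_i = bisect.bisect_left(packets, start)
--         right_i = bisect.bisect_left(packets, end)
--         buckets.append(packets[left_i:right_i])
--     packets.clear()
--     return buckets
-- ===== SOURCE B (Python) =====
-- def partition_packets(packets, bucket_ranges):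
--     '''
--     Given a list of value and a list of N half-open intervals,
--     returns N lists containing the (sorted) values in each interval.
--     '''
--     buckets = [sorted(v for v in packets if start <= v < end)
--                for start, end in bucket_ranges]
--     packets.clear()
--     return buckets
-- ===== Notes on version B (the rewrite author's own statement) =====
-- stated objective: simpler
-- what changed: B drops the global sort + bisect slicing: each bucket is built directly as a filter of the packets (start <= v < end) sorted on its own, in a single comprehension.
import Mathlib
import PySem

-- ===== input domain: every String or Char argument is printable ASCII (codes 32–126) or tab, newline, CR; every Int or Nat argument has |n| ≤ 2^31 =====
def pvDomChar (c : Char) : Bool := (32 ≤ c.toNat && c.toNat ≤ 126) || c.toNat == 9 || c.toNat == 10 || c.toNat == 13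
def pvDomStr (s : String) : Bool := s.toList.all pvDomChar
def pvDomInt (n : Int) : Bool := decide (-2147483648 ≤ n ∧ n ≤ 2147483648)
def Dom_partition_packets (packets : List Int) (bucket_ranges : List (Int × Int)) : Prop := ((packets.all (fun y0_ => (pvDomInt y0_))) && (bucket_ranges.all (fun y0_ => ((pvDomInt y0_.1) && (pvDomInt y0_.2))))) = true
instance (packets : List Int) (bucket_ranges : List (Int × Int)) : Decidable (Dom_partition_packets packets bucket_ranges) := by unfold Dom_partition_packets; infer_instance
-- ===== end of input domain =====

-- ===== PRECONDITION & SPEC =====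
-- ===== PORT A =====
-- B changes return-value computation only; like A, the Python B empties `packets`
-- in place (the ports model the return value).
-- bisect.bisect_left / sort() / slicing are ported with the PySem primitives.
def partition_packets (packets : List Int) (bucket_ranges : List (Int × Int)) : List (List Int) :=
  let sortedPackets := PySem.List.sorted packets (fun x => x) false   -- packets.sort()
  bucket_ranges.foldl (fun buckets se =>
    let left_i : Int := (PySem.List.bisectLeft sortedPackets se.1 : Nat)
    let right_i : Int := (PySem.List.bisectLeft sortedPackets se.2 : Nat)
    buckets ++ [PySem.List.slice sortedPackets (some left_i) (some right_i)]) []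

-- ===== PORT B =====
def partition_packets_alt (packets : List Int) (bucket_ranges : List (Int × Int)) : List (List Int) :=
  bucket_ranges.map (fun se =>
    PySem.List.sorted (packets.filter (fun v => decide (se.1 ≤ v) && decide (v < se.2))) (fun x => x) false)


def Spec_partition_packets (packets : List Int) (bucket_ranges : List (Int × Int)) (out : List (List Int)) : Prop := out = partition_packets_alt packets bucket_ranges
instance (packets : List Int) (bucket_ranges : List (Int × Int)) (out : List (List Int)) : Decidable (Spec_partition_packets packets bucket_ranges out) := by unfold Spec_partition_packets; infer_instance

-- ===== CLAIM (what is proved, stated in full; the proofs are below) =====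
def Claim_equal_partition_packets : Prop := ∀ (packets : List Int) (bucket_ranges : List (Int × Int)), Dom_partition_packets packets bucket_ranges → Spec_partition_packets packets bucket_ranges (partition_packets packets bucket_ranges)

-- ===== LEMMAS AND PROOFS =====

-- In a sorted list, the half-open slice [bisect_left a, bisect_left b) is exactly
-- the filter of the values v with a ≤ v < b.
theorem slice_bisect_eq_filter (s : List Int) (hs : s.Pairwise (fun x y => x ≤ y)) (a b : Int) :
    PySem.List.slice s (some ((PySem.List.bisectLeft s a : Nat) : Int))
        (some ((PySem.List.bisectLeft s b : Nat) : Int))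
      = s.filter (fun v => decide (a ≤ v) && decide (v < b)) := by
  obtain ⟨hla, h2a, h3a⟩ := PySem.List.bisectLeft_spec s a hs
  obtain ⟨hlb, h2b, h3b⟩ := PySem.List.bisectLeft_spec s b hs
  set li := PySem.List.bisectLeft s a with hli
  set ri := PySem.List.bisectLeft s b with hri
  rw [PySem.List.slice_natCast]
  by_cases hab : ri < li
  · -- empty slice; and no v can satisfy a ≤ v < b (b ≤ a there)
    have hba : b ≤ a := by
      by_contra hb
      push Not at hb
      -- li ≤ s.length and ri < li so ri < s.length; s[ri] < b from bisect a side? use indices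
      have hrl : ri < s.length := lt_of_lt_of_le hab hla
      have h1 := h2a ri hrl hab              -- s[ri] < a
      have h2 := h3b ri hrl (le_refl ri)     -- b ≤ s[ri]
      omega
    have htake : ri - li = 0 := by omega
    rw [htake]
    simp only [List.take_zero]
    symm
    rw [List.filter_eq_nil_iff]
    intro x _
    simp only [Bool.and_eq_true, decide_eq_true_eq, not_and]
    intro h1 h2
    omega
  · push Not at hab   -- li ≤ ri
    have hdecomp : s = s.take li ++ ((s.drop li).take (ri - li) ++ s.drop ri) := by
      have : (s.drop li).take (ri - li) ++ s.drop ri = s.drop li := by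
        have h := List.take_append_drop (ri - li) (s.drop li)
        rw [List.drop_drop] at h
        have he : li + (ri - li) = ri := by omega
        rw [he] at h
        exact h
      rw [this, List.take_append_drop]
    conv_rhs => rw [hdecomp]
    rw [List.filter_append, List.filter_append]
    have hpre : (s.take li).filter (fun v => decide (a ≤ v) && decide (v < b)) = [] := by
      rw [List.filter_eq_nil_iff]
      intro x hx
      obtain ⟨j, hj, hxe⟩ := List.mem_iff_getElem.mp hx
      have hjl : j < li := lt_of_lt_of_le hj (by simp [List.length_take])
      have hjs : j < s.length := by
        have := List.length_take_le li s
        omega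
      have : (s.take li)[j] = s[j] := List.getElem_take
      have hlt := h2a j hjs hjl
      simp only [Bool.and_eq_true, decide_eq_true_eq, not_and]
      intro h1
      omega
    have hmid : ((s.drop li).take (ri - li)).filter (fun v => decide (a ≤ v) && decide (v < b))
        = (s.drop li).take (ri - li) := by
      rw [List.filter_eq_self]
      intro x hx
      obtain ⟨j, hj, hxe⟩ := List.mem_iff_getElem.mp hx
      have hjd : j < (s.drop li).length := lt_of_lt_of_le hj (by simp [List.length_take])
      have hjs : li + j < s.length := by
        simp [List.length_drop] at hjd
        omega
      have hget : ((s.drop li).take (ri - li))[j] = s[li + j] := by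
        rw [List.getElem_take, List.getElem_drop]
      have hjri : li + j < ri := by
        have := List.length_take_le (ri - li) (s.drop li)
        have hj2 : j < ri - li := by
          have : ((s.drop li).take (ri - li)).length ≤ ri - li := by
            simp [List.length_take]
          omega
        omega
      have h1 := h3a (li + j) hjs (by omega)   -- a ≤ s[li+j]
      have h2 := h2b (li + j) hjs hjri          -- s[li+j] < b
      simp only [Bool.and_eq_true, decide_eq_true_eq]
      constructor <;> omega
    have hsuf : (s.drop ri).filter (fun v => decide (a ≤ v) && decide (v < b)) = [] := by
      rw [List.filter_eq_nil_iff]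
      intro x hx
      obtain ⟨j, hj, hxe⟩ := List.mem_iff_getElem.mp hx
      have hjs : ri + j < s.length := by
        simp [List.length_drop] at hj
        omega
      have hget : (s.drop ri)[j] = s[ri + j] := List.getElem_drop
      have h2 := h3b (ri + j) hjs (by omega)   -- b ≤ s[ri+j]
      simp only [Bool.and_eq_true, decide_eq_true_eq, not_and]
      intro h1
      omega
    rw [hpre, hmid, hsuf]
    simp

-- sorting commutes with filtering (on Int with the identity key).
theorem sorted_filter_comm (packets : List Int) (p : Int → Bool) :
    PySem.List.sorted (packets.filter p) (fun x => x) false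
      = (PySem.List.sorted packets (fun x => x) false).filter p := by
  apply PySem.List.sorted_id_eq_of_perm_of_pairwise
  · exact (PySem.List.sorted_perm packets (fun x => x) false).filter p
  · exact (PySem.List.sorted_pairwise packets (fun x => x)).filter p

-- ===== VERDICT (by name: the statement is the Claim_ definition above) =====
theorem partition_packets_spec : Claim_equal_partition_packets := by
  intro packets bucket_ranges _
  unfold Spec_partition_packets partition_packets partition_packets_alt
  have hfold : ∀ (l : List (Int × Int)) (acc : List (List Int)),
      l.foldl (fun buckets se =>
        buckets ++ [PySem.List.slice (PySem.List.sorted packets (fun x => x) false)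
          (some ((PySem.List.bisectLeft (PySem.List.sorted packets (fun x => x) false) se.1 : Nat) : Int))
          (some ((PySem.List.bisectLeft (PySem.List.sorted packets (fun x => x) false) se.2 : Nat) : Int))]) acc
      = acc ++ l.map (fun se =>
          PySem.List.sorted (packets.filter (fun v => decide (se.1 ≤ v) && decide (v < se.2))) (fun x => x) false) := by
    intro l
    induction l with
    | nil => intro acc; simp
    | cons hd tl ih =>
      intro acc
      simp only [List.foldl_cons, List.map_cons, ih]
      rw [slice_bisect_eq_filter _ (PySem.List.sorted_pairwise packets (fun x => x)) hd.1 hd.2,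
        ← sorted_filter_comm]
      simp
  simpa using hfold bucket_ranges []
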